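-- pv_equiv track=rewrite | github.com/ThomasPlacide/ESTACA_ChallengeUTAC_2023 | Main_Simulation/PythonScripts/test3.py | comparer
-- ===== SOURCE A (Python) =====
-- def comparer(liste1, liste2):
--     res = []
--     res1 = []
--     for i in range(len(liste1)):
--         for j in range(len(liste2)):
--             if liste2[j][1] == liste1[i][1]:
--                 res.append(liste2[j])
--                 res1.append(liste1[i])
--     return res, res1
-- ===== SOURCE B (Python) =====
-- def comparer(liste1, liste2):
--     groups = {}
--     for row in liste2:
--         groups.setdefault(row[1], []).append(row)
--     res = []
--     res1 = []
--     for row in liste1: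
--         g = groups.get(row[1], [])
--         res.extend(g)
--         res1.extend([row] * len(g))
--     return res, res1
-- ===== Notes on version B (the rewrite author's own statement) =====
-- stated objective: alternative
-- what changed: Replaces the nested index loops (scan all of liste2 for every liste1 row) by a one-pass hash grouping of liste2 by its second field, then one pass over liste1 emitting each row's precomputed group.
-- outside the precondition, e.g. on comparer([], [[1]]): A returns ([], []), B raises IndexError; on comparer([[1]], []): A returns ([], []), B raises IndexError
import Mathlib
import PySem

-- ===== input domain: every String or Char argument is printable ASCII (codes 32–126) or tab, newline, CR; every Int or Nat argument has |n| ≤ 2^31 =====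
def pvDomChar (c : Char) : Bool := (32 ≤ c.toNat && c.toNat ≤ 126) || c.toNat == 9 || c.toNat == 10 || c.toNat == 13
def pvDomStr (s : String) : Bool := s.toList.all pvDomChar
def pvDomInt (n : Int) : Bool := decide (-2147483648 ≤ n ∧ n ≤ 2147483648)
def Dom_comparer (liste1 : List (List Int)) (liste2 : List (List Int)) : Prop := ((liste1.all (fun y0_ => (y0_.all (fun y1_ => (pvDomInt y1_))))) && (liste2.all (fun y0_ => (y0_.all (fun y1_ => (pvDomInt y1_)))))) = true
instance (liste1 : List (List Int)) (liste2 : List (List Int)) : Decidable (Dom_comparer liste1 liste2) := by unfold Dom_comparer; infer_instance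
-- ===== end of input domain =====

-- B replaces A's nested index loops by a one-pass hash grouping of liste2 by its
-- second field followed by one pass over liste1 (alternative algorithm; avoids the inner scan).


-- ===== PORT A =====
-- nested index loops: for i in range(len(liste1)): for j in range(len(liste2)): …
-- row[1] is PySem.List.pyGetD row 1 0 (index in range under Pre_comparer)
def comparer (liste1 : List (List Int)) (liste2 : List (List Int)) : List (List Int) × List (List Int) :=
  (PySem.List.pyRange 0 liste1.length 1).foldl
    (fun (st : List (List Int) × List (List Int)) i =>
      (PySem.List.pyRange 0 liste2.length 1).foldl
        (fun (st : List (List Int) × List (List Int)) j =>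
          if PySem.List.pyGetD (PySem.List.pyGetD liste2 j []) 1 0
              = PySem.List.pyGetD (PySem.List.pyGetD liste1 i []) 1 0 then
            (st.1 ++ [PySem.List.pyGetD liste2 j []], st.2 ++ [PySem.List.pyGetD liste1 i []])
          else st)
        st)
    ([], [])

-- ===== PORT B =====
-- first pass of Source B: groups.setdefault(row[1], []).append(row)  ≡  modify row[1] [] (· ++ [row])
def pvGroups (liste2 : List (List Int)) : PySem.Dict Int (List (List Int)) :=
  liste2.foldl (fun d row => d.modify (PySem.List.pyGetD row 1 0) [] (· ++ [row])) PySem.Dict.empty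

-- second pass: res.extend(g); res1.extend([row]*len(g))
def comparer_alt (liste1 : List (List Int)) (liste2 : List (List Int)) : List (List Int) × List (List Int) :=
  liste1.foldl
    (fun (st : List (List Int) × List (List Int)) row =>
      let g := (pvGroups liste2).getD (PySem.List.pyGetD row 1 0) []
      (st.1 ++ g, st.2 ++ List.replicate g.length row))
    ([], [])

-- ===== PRECONDITION & SPEC =====
-- Pre_ requires every row of both lists to have an index 1 (length ≥ 2): on a short row
-- Python A raises IndexError whenever the other list is nonempty, and B indexes row[1] of
-- every row, so it raises on every excluded input (including those, with the other list
-- empty, on which A returns a pair of empty lists without touching a row — see the cites).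
def Pre_comparer (liste1 : List (List Int)) (liste2 : List (List Int)) : Prop :=
  (∀ r ∈ liste1, 2 ≤ r.length) ∧ (∀ r ∈ liste2, 2 ≤ r.length)
instance (liste1 : List (List Int)) (liste2 : List (List Int)) : Decidable (Pre_comparer liste1 liste2) := by unfold Pre_comparer; infer_instance

def pvWitness_comparer : List (List Int) × List (List Int) := ([[1, 2], [3, 4]], [[5, 2], [6, 4], [7, 9]])

def Spec_comparer (liste1 : List (List Int)) (liste2 : List (List Int)) (out : List (List Int) × List (List Int)) : Prop := out = comparer_alt liste1 liste2
instance (liste1 : List (List Int)) (liste2 : List (List Int)) (out : List (List Int) × List (List Int)) : Decidable (Spec_comparer liste1 liste2 out) := by unfold Spec_comparer; infer_instance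

-- ===== CLAIM (what is proved, stated in full; the proofs are below) =====
def Claim_equal_comparer : Prop := ∀ (liste1 : List (List Int)) (liste2 : List (List Int)), Dom_comparer liste1 liste2 → Pre_comparer liste1 liste2 → Spec_comparer liste1 liste2 (comparer liste1 liste2)

-- ===== LEMMAS AND PROOFS =====

-- A's inner loop over liste2 appends the matching rows (and a copy of r1 for each match)
theorem pv_inner_loop (l2 : List (List Int)) (r1 : List Int)
    (st : List (List Int) × List (List Int)) :
    l2.foldl (fun st r2 =>
        if PySem.List.pyGetD r2 1 0 = PySem.List.pyGetD r1 1 0 then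
          (st.1 ++ [r2], st.2 ++ [r1]) else st) st
      = (st.1 ++ l2.filter (fun r2 => PySem.List.pyGetD r2 1 0 = PySem.List.pyGetD r1 1 0),
         st.2 ++ (l2.filter (fun r2 => PySem.List.pyGetD r2 1 0 = PySem.List.pyGetD r1 1 0)).map
                   (fun _ => r1)) := by
  induction l2 generalizing st with
  | nil => simp
  | cons h t ih =>
    simp only [List.foldl_cons, List.filter_cons]
    by_cases hk : PySem.List.pyGetD h 1 0 = PySem.List.pyGetD r1 1 0
    · simp [hk, ih]
    · simp [hk, ih]

-- a fold that appends F r to the first and G r to the second component is a pair of flatMaps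
theorem pv_outer_loop (l1 : List (List Int)) (F G : List Int → List (List Int))
    (st : List (List Int) × List (List Int)) :
    l1.foldl (fun (st : List (List Int) × List (List Int)) r => (st.1 ++ F r, st.2 ++ G r)) st
      = (st.1 ++ l1.flatMap F, st.2 ++ l1.flatMap G) := by
  induction l1 generalizing st with
  | nil => simp
  | cons h t ih => simp [ih, List.append_assoc]

-- B's grouping pass, looked up at k, is exactly the filter of liste2 by key k
theorem pv_groups_getD (l2 : List (List Int)) (k : Int) :
    (pvGroups l2).getD k [] = l2.filter (fun r2 => PySem.List.pyGetD r2 1 0 = k) := by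
  have h := PySem.Dict.getD_foldl_modify_append
      (l := l2.map (fun r => (PySem.List.pyGetD r 1 0, r)))
      (d := (PySem.Dict.empty : PySem.Dict Int (List (List Int)))) (c := k)
  rw [List.foldl_map] at h
  simp only [PySem.Dict.getD_empty, List.nil_append, List.filter_map, List.map_map] at h
  unfold pvGroups
  simpa [Function.comp_def] using h

-- A's whole double loop in closed form
theorem pvA_closed (liste1 liste2 : List (List Int)) :
    comparer liste1 liste2
      = (liste1.flatMap (fun r1 => liste2.filter
            (fun r2 => PySem.List.pyGetD r2 1 0 = PySem.List.pyGetD r1 1 0)),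
         liste1.flatMap (fun r1 => (liste2.filter
            (fun r2 => PySem.List.pyGetD r2 1 0 = PySem.List.pyGetD r1 1 0)).map (fun _ => r1))) := by
  refine (PySem.List.foldl_pyRange_zero_pyGetD' liste1 ([] : List Int)
      (fun (st : List (List Int) × List (List Int)) r1 =>
        (PySem.List.pyRange 0 (liste2.length : Int) 1).foldl
          (fun (st : List (List Int) × List (List Int)) j =>
            if PySem.List.pyGetD (PySem.List.pyGetD liste2 j []) 1 0
                = PySem.List.pyGetD r1 1 0 then
              (st.1 ++ [PySem.List.pyGetD liste2 j []], st.2 ++ [r1])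
            else st) st)
      ([], [])).trans ?_
  have hfun : (fun (st : List (List Int) × List (List Int)) (r1 : List Int) =>
        (PySem.List.pyRange 0 (liste2.length : Int) 1).foldl
          (fun (st : List (List Int) × List (List Int)) j =>
            if PySem.List.pyGetD (PySem.List.pyGetD liste2 j []) 1 0
                = PySem.List.pyGetD r1 1 0 then
              (st.1 ++ [PySem.List.pyGetD liste2 j []], st.2 ++ [r1])
            else st) st)
      = (fun (st : List (List Int) × List (List Int)) (r1 : List Int) =>
          (st.1 ++ liste2.filter (fun r2 => PySem.List.pyGetD r2 1 0 = PySem.List.pyGetD r1 1 0),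
           st.2 ++ (liste2.filter (fun r2 => PySem.List.pyGetD r2 1 0 = PySem.List.pyGetD r1 1 0)).map
                     (fun _ => r1))) := by
    funext st r1
    exact (PySem.List.foldl_pyRange_zero_pyGetD' liste2 ([] : List Int)
      (fun (st : List (List Int) × List (List Int)) r2 =>
        if PySem.List.pyGetD r2 1 0 = PySem.List.pyGetD r1 1 0 then
          (st.1 ++ [r2], st.2 ++ [r1]) else st) st).trans (pv_inner_loop liste2 r1 st)
  rw [hfun, pv_outer_loop]
  simp

-- B's two passes in the same closed form
theorem pvB_closed (liste1 liste2 : List (List Int)) :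
    comparer_alt liste1 liste2
      = (liste1.flatMap (fun r1 => liste2.filter
            (fun r2 => PySem.List.pyGetD r2 1 0 = PySem.List.pyGetD r1 1 0)),
         liste1.flatMap (fun r1 => (liste2.filter
            (fun r2 => PySem.List.pyGetD r2 1 0 = PySem.List.pyGetD r1 1 0)).map (fun _ => r1))) := by
  refine (pv_outer_loop liste1
      (fun r => (pvGroups liste2).getD (PySem.List.pyGetD r 1 0) [])
      (fun r => List.replicate ((pvGroups liste2).getD (PySem.List.pyGetD r 1 0) []).length r)
      ([], [])).trans ?_
  simp only [List.nil_append]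
  refine Prod.ext ?_ ?_
  · simp only []
    congr 1
    funext r
    rw [pv_groups_getD]
  · simp only []
    congr 1
    funext r
    rw [pv_groups_getD, List.map_const']

-- ===== VERDICT (by name: the statement is the Claim_ definition above) =====
theorem comparer_spec : Claim_equal_comparer := by
  intro liste1 liste2 _ _
  exact (pvA_closed liste1 liste2).trans (pvB_closed liste1 liste2).symm
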